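-- pv_equiv track=rewrite | github.com/javadhamidi/calibre-web-odradek | cps/services/ai_librarian.py | pick_format
-- ===== SOURCE A (Python) =====
-- SUPPORTED_FORMATS = ("epub", "pdf", "txt")
--
-- def pick_format(available_formats):
--     """Given a list/set of format strings (any case), return preferred one or None."""
--     if not available_formats:
--         return None
--     lowered = {f.lower() for f in available_formats}
--     for pref in SUPPORTED_FORMATS:
--         if pref in lowered:
--             return pref
--     return None
-- ===== SOURCE B (Python) =====
-- SUPPORTED_FORMATS = ("epub", "pdf", "txt")
--
-- _RANK = {f: i for i, f in enumerate(SUPPORTED_FORMATS)}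
--
-- def pick_format(available_formats):
--     """Given a list/set of format strings (any case), return preferred one or None."""
--     best = None
--     for f in available_formats:
--         r = _RANK.get(f.lower())
--         if r is not None and (best is None or r < best):
--             best = r
--     return None if best is None else SUPPORTED_FORMATS[best]
-- ===== Notes on version B (the rewrite author's own statement) =====
-- stated objective: alternative
-- what changed: B scans the input once keeping the minimum preference rank (via a rank dict) instead of building a lowered set and scanning the preference list with early return.
import Mathlib
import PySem

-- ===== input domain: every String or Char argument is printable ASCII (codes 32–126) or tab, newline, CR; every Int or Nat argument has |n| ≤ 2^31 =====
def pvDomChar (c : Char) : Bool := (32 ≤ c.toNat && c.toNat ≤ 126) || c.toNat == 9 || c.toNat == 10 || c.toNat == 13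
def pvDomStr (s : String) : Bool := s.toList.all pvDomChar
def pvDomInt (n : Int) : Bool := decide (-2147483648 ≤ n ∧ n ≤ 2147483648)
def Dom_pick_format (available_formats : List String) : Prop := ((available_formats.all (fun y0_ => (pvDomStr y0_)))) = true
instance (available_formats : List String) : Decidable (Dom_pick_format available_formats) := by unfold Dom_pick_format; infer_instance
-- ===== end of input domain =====

-- B replaces A's "build lowered set, scan preference list with early return" by a single pass
-- over the input that keeps the minimum preference rank (alternative decomposition, same cost).

-- ===== PORT A =====
def pvSupportedFormats : List String := ["epub", "pdf", "txt"]

-- the 'for pref in SUPPORTED_FORMATS: if pref in lowered: return pref' loop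
def pvPickLoop (prefs : List String) (lowered : PySem.Set String) : Option String :=
  match prefs with
  | [] => none
  | p :: rest => if PySem.Set.contains lowered p then some p else pvPickLoop rest lowered

def pick_format (available_formats : List String) : Option String :=
  if available_formats = [] then none
  else
    let lowered : PySem.Set String :=
      PySem.Set.ofList (available_formats.map PySem.Str.lower)
    pvPickLoop pvSupportedFormats lowered

-- ===== PORT B =====
-- _RANK = {f: i for i, f in enumerate(SUPPORTED_FORMATS)}
def pvRank : PySem.Dict String Nat :=
  ((PySem.Dict.empty.insert "epub" 0).insert "pdf" 1).insert "txt" 2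

def pick_format_alt (available_formats : List String) : Option String :=
  let best : Option Nat :=
    available_formats.foldl
      (fun best f =>
        match PySem.Dict.get? pvRank (PySem.Str.lower f) with
        | none => best
        | some r =>
          match best with
          | none => some r
          | some b => if r < b then some r else best)
      none
  match best with
  | none => none
  | some b => pvSupportedFormats[b]?   -- SUPPORTED_FORMATS[best]; best is always in range

-- ===== PRECONDITION & SPEC =====
def Spec_pick_format (available_formats : List String) (out : Option String) : Prop := out = pick_format_alt available_formats
instance (available_formats : List String) (out : Option String) : Decidable (Spec_pick_format available_formats out) := by unfold Spec_pick_format; infer_instance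

-- ===== CLAIM (what is proved, stated in full; the proofs are below) =====
def Claim_equal_pick_format : Prop := ∀ (available_formats : List String), Dom_pick_format available_formats → Spec_pick_format available_formats (pick_format available_formats)

-- ===== LEMMAS AND PROOFS =====

-- the three membership flags both programs' results are determined by
def pvHas (w : String) (xs : List String) : Bool :=
  xs.any (fun f => PySem.Str.lower f == w)

-- the canonical result as a function of the flags
def pvCanon (xs : List String) : Option String :=
  if pvHas "epub" xs then some "epub"
  else if pvHas "pdf" xs then some "pdf"
  else if pvHas "txt" xs then some "txt"
  else none

def pvMinO : Option Nat → Option Nat → Option Nat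
  | none, y => y
  | some b, none => some b
  | some b, some r => some (min r b)

lemma pvRank_char (s : String) :
    PySem.Dict.get? pvRank s =
      if s = "epub" then some 0 else if s = "pdf" then some 1
      else if s = "txt" then some 2 else none := by
  simp [pvRank, PySem.Dict.get?_insert, PySem.Dict.get?_empty]
  split_ifs <;> simp_all

lemma pvStep_eq (best : Option Nat) (f : String) :
    (match PySem.Dict.get? pvRank (PySem.Str.lower f) with
     | none => best
     | some r =>
       match best with
       | none => some r
       | some b => if r < b then some r else best)
    = pvMinO best (PySem.Dict.get? pvRank (PySem.Str.lower f)) := by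
  cases PySem.Dict.get? pvRank (PySem.Str.lower f) with
  | none => cases best <;> rfl
  | some r =>
    cases best with
    | none => rfl
    | some b =>
      simp only [pvMinO]
      split_ifs with h <;> (congr 1; omega)

lemma pvMinO_assoc (a b c : Option Nat) :
    pvMinO (pvMinO a b) c = pvMinO a (pvMinO b c) := by
  cases a <;> cases b <;> cases c <;> simp [pvMinO] <;> omega

lemma pvFold_out (l : List String) (b : Option Nat) :
    l.foldl (fun best f => pvMinO best (PySem.Dict.get? pvRank (PySem.Str.lower f))) b
    = pvMinO b (l.foldl (fun best f => pvMinO best (PySem.Dict.get? pvRank (PySem.Str.lower f))) none) := by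
  induction l generalizing b with
  | nil => cases b <;> rfl
  | cons x l ih =>
    simp only [List.foldl_cons]
    rw [ih, ih (pvMinO none _), ← pvMinO_assoc]
    rfl

lemma pvFold_char (xs : List String) :
    xs.foldl (fun best f => pvMinO best (PySem.Dict.get? pvRank (PySem.Str.lower f))) none
    = (if pvHas "epub" xs then some 0 else if pvHas "pdf" xs then some 1
       else if pvHas "txt" xs then some 2 else none) := by
  induction xs with
  | nil => simp [pvHas]
  | cons x l ih =>
    simp only [List.foldl_cons]
    rw [pvFold_out, ih, pvRank_char]
    simp only [pvHas, List.any_cons] at *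
    by_cases h1 : PySem.Str.lower x = "epub" <;>
    by_cases h2 : PySem.Str.lower x = "pdf" <;>
    by_cases h3 : PySem.Str.lower x = "txt" <;>
      simp [h1, h2, h3] <;> try (split_ifs <;> rfl)

lemma pvAlt_char (xs : List String) : pick_format_alt xs = pvCanon xs := by
  unfold pick_format_alt pvCanon
  simp only [funext fun best => funext fun f => pvStep_eq best f]
  rw [pvFold_char]
  split_ifs <;> rfl

lemma pvContains_iff (xs : List String) (w : String) :
    PySem.Set.contains (PySem.Set.ofList (xs.map PySem.Str.lower)) w = pvHas w xs := by
  rw [Bool.eq_iff_iff, PySem.Set.contains_iff, PySem.Set.mem_ofList, List.mem_map]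
  unfold pvHas
  rw [List.any_eq_true]
  constructor
  · rintro ⟨a, ha, rfl⟩; exact ⟨a, ha, by simp⟩
  · rintro ⟨a, ha, hb⟩; exact ⟨a, ha, by simpa using hb⟩

lemma pvA_char (xs : List String) : pick_format xs = pvCanon xs := by
  unfold pick_format
  split_ifs with h
  · subst h; rfl
  · simp only [pvPickLoop, pvSupportedFormats, pvContains_iff, pvCanon]
    try (split_ifs <;> rfl)

-- ===== VERDICT (by name: the statement is the Claim_ definition above) =====
theorem pick_format_spec : Claim_equal_pick_format := by
  intro xs _
  unfold Spec_pick_format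
  rw [pvA_char, pvAlt_char]
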